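-- pv_equiv track=rewrite | github.com/singhh-piyush/ResNet-Chess-Engine | data_miner.py | split_pgn_text
-- ===== SOURCE A (Python) =====
-- def split_pgn_text(pgn_full_text):
--     """
--     Splits a large string of multiple PGN games into a list of single PGN strings.
--     This is a heuristic split on '[Event "'.
--     """
--     # Simply using a regex or split might be fragile if [Event " appears in comments.
--     # But for Chess.com PGN downloads, it's usually clean.
--     # A safer way might be to iterate line by line, but splitting on '\n[Event "' is reasonably safe.
--     # We add the newline back.
--
--     games = []
--     current_game = []
--
--     for line in pgn_full_text.splitlines():
--         if line.startswith('[Event "'):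
--             if current_game:
--                 games.append("\n".join(current_game))
--                 current_game = []
--         current_game.append(line)
--
--     if current_game:
--         games.append("\n".join(current_game))
--
--     return games
-- ===== SOURCE B (Python) =====
-- def split_pgn_text(pgn_full_text):
--     """
--     Splits a large string of multiple PGN games into a list of single PGN strings.
--     Segment-at-a-time: repeatedly take the head line plus the following run of
--     non-'[Event "' lines as one game, instead of flushing a running buffer.
--     """
--     def span_not_event(ls):
--         for k, line in enumerate(ls):
--             if line.startswith('[Event "'):
--                 return ls[:k], ls[k:]
--         return ls, []
--
--     games = []
--     ls = pgn_full_text.splitlines()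
--     while ls:
--         pre, suf = span_not_event(ls[1:])
--         games.append("\n".join([ls[0]] + pre))
--         ls = suf
--     return games
-- ===== Notes on version B (the rewrite author's own statement) =====
-- stated objective: alternative
-- what changed: Replaces A's flush-on-'[Event "'-line running-buffer accumulation with a segment-at-a-time scan: repeatedly split off the head line plus the following run of non-'[Event "' lines as one game and continue on the remainder.
import Mathlib
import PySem

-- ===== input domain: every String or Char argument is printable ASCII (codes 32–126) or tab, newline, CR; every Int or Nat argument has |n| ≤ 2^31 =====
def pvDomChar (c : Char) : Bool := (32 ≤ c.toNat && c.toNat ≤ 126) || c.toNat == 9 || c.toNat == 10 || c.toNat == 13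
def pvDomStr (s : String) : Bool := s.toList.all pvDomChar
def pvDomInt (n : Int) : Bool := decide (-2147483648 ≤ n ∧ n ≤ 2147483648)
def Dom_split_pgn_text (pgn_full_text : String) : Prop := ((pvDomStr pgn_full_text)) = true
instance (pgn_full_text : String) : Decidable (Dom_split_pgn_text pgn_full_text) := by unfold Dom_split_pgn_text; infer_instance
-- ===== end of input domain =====

-- B replaces A's flush-on-event running-buffer accumulation with a segment-at-a-time
-- scan (head line + following run of non-'[Event "' lines per game); same cost (alternative).

-- ===== PORT A =====
-- one loop iteration of A: maybe flush the current buffer, then append the line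
def pvStepA (st : List String × List String) (line : String) : List String × List String :=
  let st' := if PySem.Str.startswith line "[Event \"" then
      (if st.2 ≠ ([] : List String) then (st.1 ++ [PySem.Str.join "\n" st.2], ([] : List String)) else st)
    else st
  (st'.1, st'.2 ++ [line])

def split_pgn_text (pgn_full_text : String) : List String :=
  let r := (PySem.Str.splitlines pgn_full_text).foldl pvStepA ([], [])
  if r.2 ≠ ([] : List String) then r.1 ++ [PySem.Str.join "\n" r.2] else r.1

-- ===== PORT B =====
-- span_not_event: leading run of lines not starting with '[Event "', and the rest
def pvSpanNotEvent : List String → List String × List String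
  | [] => ([], [])
  | a :: ls =>
      if PySem.Str.startswith a "[Event \"" then ([], a :: ls)
      else
        let p := pvSpanNotEvent ls
        (a :: p.1, p.2)

theorem pvSpanNotEvent_snd_len_le (ls : List String) : (pvSpanNotEvent ls).2.length ≤ ls.length := by
  induction ls with
  | nil => simp [pvSpanNotEvent]
  | cons a ls ih =>
      simp only [pvSpanNotEvent]
      split
      · simp
      · simpa using Nat.le_succ_of_le ih

-- the while loop of B: split off one game per iteration
def pvGamesB : List String → List String
  | [] => []
  | l :: ls =>
      let p := pvSpanNotEvent ls
      PySem.Str.join "\n" (l :: p.1) :: pvGamesB p.2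
termination_by ls => ls.length
decreasing_by
  simpa using Nat.lt_succ_of_le (pvSpanNotEvent_snd_len_le ls)

def split_pgn_text_alt (pgn_full_text : String) : List String :=
  pvGamesB (PySem.Str.splitlines pgn_full_text)

-- ===== PRECONDITION & SPEC =====
def Spec_split_pgn_text (pgn_full_text : String) (out : List String) : Prop := out = split_pgn_text_alt pgn_full_text
instance (pgn_full_text : String) (out : List String) : Decidable (Spec_split_pgn_text pgn_full_text out) := by unfold Spec_split_pgn_text; infer_instance

-- ===== CLAIM (what is proved, stated in full; the proofs are below) =====
def Claim_equal_split_pgn_text : Prop := ∀ (pgn_full_text : String), Dom_split_pgn_text pgn_full_text → Spec_split_pgn_text pgn_full_text (split_pgn_text pgn_full_text)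

-- ===== LEMMAS AND PROOFS =====

def pvFinalize (r : List String × List String) : List String :=
  if r.2 ≠ ([] : List String) then r.1 ++ [PySem.Str.join "\n" r.2] else r.1

theorem pvMain (ls : List String) : ∀ (g c : List String), c ≠ [] →
    pvFinalize (ls.foldl pvStepA (g, c)) =
      g ++ PySem.Str.join "\n" (c ++ (pvSpanNotEvent ls).1) :: pvGamesB (pvSpanNotEvent ls).2 := by
  induction ls with
  | nil =>
      intro g c hc
      simp [pvFinalize, pvSpanNotEvent, pvGamesB, hc]
  | cons a ls ih =>
      intro g c hc
      by_cases hs : PySem.Chars.startswith a.toList ['[', 'E', 'v', 'e', 'n', 't', ' ', '\"'] = true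
      · have hstep : pvStepA (g, c) a = (g ++ [PySem.Str.join "\n" c], [a]) := by
          simp [pvStepA, hs, hc]
        rw [List.foldl_cons, hstep, ih _ [a] (by simp)]
        simp [pvSpanNotEvent, hs, pvGamesB, List.append_assoc]
      · have hstep : pvStepA (g, c) a = (g, c ++ [a]) := by
          simp [pvStepA, hs]
        rw [List.foldl_cons, hstep, ih _ (c ++ [a]) (by simp)]
        simp [pvSpanNotEvent, hs, List.append_assoc]

theorem pvTop (ls : List String) : pvFinalize (ls.foldl pvStepA ([], [])) = pvGamesB ls := by
  cases ls with
  | nil => simp [pvFinalize, pvGamesB]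
  | cons a ls =>
      have hstep : pvStepA ([], []) a = ([], [a]) := by
        simp [pvStepA]
      rw [List.foldl_cons, hstep, pvMain ls [] [a] (by simp)]
      simp [pvGamesB]

-- ===== VERDICT (by name: the statement is the Claim_ definition above) =====
theorem split_pgn_text_spec : Claim_equal_split_pgn_text := by
  intro s _
  show split_pgn_text s = split_pgn_text_alt s
  simpa [split_pgn_text, split_pgn_text_alt, pvFinalize] using pvTop (PySem.Str.splitlines s)
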